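-- pv_equiv track=rewrite | github.com/Shreyasgujjar/AIAssignment1 | Assignment1.py | isBoxMoved
-- ===== SOURCE A (Python) =====
-- def isBoxMoved(node, parentNode):
--   currentState = []
--   prevState = []
--   for data in node:
--     if 'R' in data:
--       currentState.append(data.replace('R', ' '))
--     else:
--       currentState.append(data)
--   for data in parentNode:
--     if 'R' in data:
--       prevState.append(data.replace('R', ' '))
--     else:
--       prevState.append(data);
--   return len(set(tuple(currentState)).intersection(set(tuple(prevState))))
-- ===== SOURCE B (Python) =====
-- def isBoxMoved(node, parentNode):
--     xs = sorted({line.replace('R', ' ') for line in node})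
--     ys = sorted({line.replace('R', ' ') for line in parentNode})
--     i = j = count = 0
--     while i < len(xs) and j < len(ys):
--         if xs[i] == ys[j]:
--             count += 1
--             i += 1
--             j += 1
--         elif xs[i] < ys[j]:
--             i += 1
--         else:
--             j += 1
--     return count
-- ===== Notes on version B (the rewrite author's own statement) =====
-- stated objective: alternative
-- what changed: Replaces the append-loops plus hash-set intersection with a map, sorted deduplicated lists and a two-pointer merge that counts equal heads.
import Mathlib
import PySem

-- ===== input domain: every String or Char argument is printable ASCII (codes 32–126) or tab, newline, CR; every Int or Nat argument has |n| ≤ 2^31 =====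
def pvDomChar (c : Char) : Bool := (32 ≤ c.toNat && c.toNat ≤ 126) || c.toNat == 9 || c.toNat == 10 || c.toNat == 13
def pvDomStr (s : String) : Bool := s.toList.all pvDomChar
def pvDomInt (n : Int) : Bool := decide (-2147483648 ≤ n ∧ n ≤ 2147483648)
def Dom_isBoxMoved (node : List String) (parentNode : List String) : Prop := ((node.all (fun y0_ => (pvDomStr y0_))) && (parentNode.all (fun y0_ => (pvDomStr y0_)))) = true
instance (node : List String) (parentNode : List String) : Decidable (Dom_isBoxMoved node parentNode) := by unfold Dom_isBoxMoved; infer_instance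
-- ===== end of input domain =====

-- B = alternative algorithm: sorted deduplicated line-lists merged with two pointers, instead of A's set intersection; return values proved equal.

-- ===== PORT A =====
def isBoxMoved (node : List String) (parentNode : List String) : Int :=
  let currentState := node.foldl (fun acc data =>
    if PySem.Str.isIn "R" data then acc ++ [PySem.Str.replace data "R" " "] else acc ++ [data]) []
  let prevState := parentNode.foldl (fun acc data =>
    if PySem.Str.isIn "R" data then acc ++ [PySem.Str.replace data "R" " "] else acc ++ [data]) []
  PySem.Set.len (PySem.Set.inter (PySem.Set.ofList currentState) (PySem.Set.ofList prevState))

-- ===== PORT B =====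
-- the while loop of Source B as structural recursion over the two list tails, counter accumulated
def pvMergeGo : List String → List String → Int → Int
  | [], _, count => count
  | _ :: _, [], count => count
  | x :: xs, y :: ys, count =>
    if x = y then pvMergeGo xs ys (count + 1)
    else if x < y then pvMergeGo xs (y :: ys) count
    else pvMergeGo (x :: xs) ys count
termination_by xs ys _ => xs.length + ys.length

def isBoxMoved_alt (node : List String) (parentNode : List String) : Int :=
  let xs := PySem.List.sorted (PySem.Set.ofList (node.map (fun line => PySem.Str.replace line "R" " "))) (fun x => x) false
  let ys := PySem.List.sorted (PySem.Set.ofList (parentNode.map (fun line => PySem.Str.replace line "R" " "))) (fun x => x) false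
  pvMergeGo xs ys 0

-- ===== PRECONDITION & SPEC =====
def Spec_isBoxMoved (node : List String) (parentNode : List String) (out : Int) : Prop := out = isBoxMoved_alt node parentNode
instance (node : List String) (parentNode : List String) (out : Int) : Decidable (Spec_isBoxMoved node parentNode out) := by unfold Spec_isBoxMoved; infer_instance

-- ===== CLAIM (what is proved, stated in full; the proofs are below) =====
def Claim_equal_isBoxMoved : Prop := ∀ (node : List String) (parentNode : List String), Dom_isBoxMoved node parentNode → Spec_isBoxMoved node parentNode (isBoxMoved node parentNode)

-- ===== LEMMAS AND PROOFS =====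

-- s.replace('R',' ') is s itself when 'R' does not occur in s
theorem pv_replace_go_of_not_infix (old new : List Char) (fuel : Nat) :
    ∀ (l acc : List Char), ¬ old <:+: l →
      PySem.Chars.replace.go old new fuel l acc = acc.reverse ++ l := by
  induction fuel with
  | zero => intro l acc _; rfl
  | succ n ih =>
    intro l acc h
    cases l with
    | nil => simp [PySem.Chars.replace.go]
    | cons c t =>
      have hp : old.isPrefixOf (c :: t) = false := by
        by_contra hne
        exact h ((List.isPrefixOf_iff_prefix.mp (by revert hne; cases old.isPrefixOf (c :: t) <;> simp)).isInfix)
      rw [PySem.Chars.replace.go, hp]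
      simp only [Bool.false_eq_true, if_false]
      rw [ih t (c :: acc) (fun hi => h (List.infix_cons hi))]
      simp

theorem pv_str_replace_id (s : String) (h : PySem.Str.isIn "R" s = false) :
    PySem.Str.replace s "R" " " = s := by
  have hni : ¬ ("R".toList <:+: s.toList) := by
    rw [← PySem.Chars.isIn_eq_false_iff]
    simpa [PySem.Str.isIn] using h
  have hl : (PySem.Str.replace s "R" " ").toList = s.toList := by
    rw [PySem.Str.toList_replace, PySem.Chars.replace,
      if_neg (by decide : ¬ ((String.toList "R").isEmpty = true)),
      pv_replace_go_of_not_infix _ _ _ _ _ hni]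
    simp
  exact String.toList_injective hl

-- A's append loop builds exactly the mapped list
theorem pv_loop_eq_map (l : List String) :
    l.foldl (fun acc data =>
      if PySem.Str.isIn "R" data then acc ++ [PySem.Str.replace data "R" " "] else acc ++ [data]) []
    = l.map (fun line => PySem.Str.replace line "R" " ") := by
  have hf : (fun (acc : List String) data =>
      if PySem.Str.isIn "R" data then acc ++ [PySem.Str.replace data "R" " "] else acc ++ [data])
      = fun acc data => acc ++ [PySem.Str.replace data "R" " "] := by
    funext acc data
    by_cases h : PySem.Str.isIn "R" data = true
    · rw [if_pos h]
    · rw [if_neg h, pv_str_replace_id data (Bool.not_eq_true _ ▸ h)]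
  rw [hf, PySem.List.foldl_append_singleton_eq_map]
  rfl

-- the two-pointer merge over strictly increasing lists counts the common elements
theorem pv_mergeGo_eq (xs ys : List String) (c : Int) :
    xs.Pairwise (· < ·) → ys.Pairwise (· < ·) →
    pvMergeGo xs ys c = c + ((xs.filter (fun x => ys.contains x)).length : Int) := by
  induction xs, ys, c using pvMergeGo.induct with
  | case1 ys c => intro _ _; simp [pvMergeGo]
  | case2 x xs c => intro _ _; simp [pvMergeGo]
  | case3 xs y ys c ih =>
    intro hx hy
    rw [List.pairwise_cons] at hx hy
    have hcy : (y :: ys).contains y = true := by simp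
    have hcongr : xs.filter (fun z => (y :: ys).contains z) = xs.filter (fun z => ys.contains z) := by
      refine List.filter_congr (fun z hz => ?_)
      have hxz : y < z := hx.1 z hz
      rw [List.contains_cons]
      have hne : (z == y) = false := by
        simp only [beq_eq_false_iff_ne, ne_eq]
        intro hzy; exact absurd (hzy ▸ hxz) (lt_irrefl y)
      rw [hne, Bool.false_or]
    rw [pvMergeGo, if_pos rfl, ih hx.2 hy.2, List.filter_cons, if_pos hcy, hcongr]
    simp
    omega
  | case4 x xs y ys c hne hlt ih =>
    intro hx hy
    rw [List.pairwise_cons] at hx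
    have hcx : (y :: ys).contains x = false := by
      have hy' := List.pairwise_cons.mp hy
      rw [List.contains_cons]
      simp only [Bool.or_eq_false_iff, beq_eq_false_iff_ne, ne_eq, List.contains_eq_mem,
        decide_eq_false_iff_not]
      exact ⟨hne, fun hz => absurd (hlt.trans (hy'.1 x hz)) (lt_irrefl x)⟩
    rw [pvMergeGo, if_neg hne, if_pos hlt, ih hx.2 hy, List.filter_cons, if_neg (by rw [hcx]; exact Bool.false_ne_true)]
  | case5 x xs y ys c hne hnlt ih =>
    intro hx hy
    rw [List.pairwise_cons] at hy
    have hylt : y < x := lt_of_le_of_ne (not_lt.mp hnlt) (fun h => hne h.symm)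
    have hcongr : (x :: xs).filter (fun z => (y :: ys).contains z)
        = (x :: xs).filter (fun z => ys.contains z) := by
      refine List.filter_congr (fun z hz => ?_)
      have hyz : y < z := by
        rcases List.mem_cons.mp hz with h | h
        · exact h ▸ hylt
        · exact hylt.trans ((List.pairwise_cons.mp hx).1 z h)
      rw [List.contains_cons]
      have hzy : (z == y) = false := by
        simp only [beq_eq_false_iff_ne, ne_eq]
        intro hzy; exact absurd (hzy ▸ hyz) (lt_irrefl y)
      rw [hzy, Bool.false_or]
    rw [pvMergeGo, if_neg hne, if_neg hnlt, ih hx hy.2, hcongr]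

theorem pv_side (node parentNode : List String) :
    isBoxMoved node parentNode = isBoxMoved_alt node parentNode := by
  unfold isBoxMoved isBoxMoved_alt
  rw [pv_loop_eq_map node, pv_loop_eq_map parentNode]
  set scur := PySem.Set.ofList (node.map (fun line => PySem.Str.replace line "R" " ")) with hscur
  set sprev := PySem.Set.ofList (parentNode.map (fun line => PySem.Str.replace line "R" " ")) with hsprev
  have hx := PySem.List.sorted_ofList_pairwise_lt (node.map (fun line => PySem.Str.replace line "R" " "))
  have hy := PySem.List.sorted_ofList_pairwise_lt (parentNode.map (fun line => PySem.Str.replace line "R" " "))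
  rw [pv_mergeGo_eq _ _ 0 (hscur ▸ hx) (hsprev ▸ hy), zero_add]
  have hcongr : (PySem.List.sorted scur (fun x => x) false).filter
        (fun z => (PySem.List.sorted sprev (fun x => x) false).contains z)
      = (PySem.List.sorted scur (fun x => x) false).filter (fun z => sprev.contains z) := by
    refine List.filter_congr (fun z _ => ?_)
    simp [PySem.Set.contains_eq_listContains, List.contains_eq_mem, PySem.List.mem_sorted]
  rw [hcongr]
  have hperm : ((PySem.List.sorted scur (fun x => x) false).filter (fun z => sprev.contains z)).Perm
      (scur.filter (fun z => sprev.contains z)) :=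
    (PySem.List.sorted_perm scur (fun x => x) false).filter _
  rw [PySem.Set.len, PySem.Set.inter, hperm.length_eq]

-- ===== VERDICT (by name: the statement is the Claim_ definition above) =====
theorem isBoxMoved_spec : Claim_equal_isBoxMoved := by
  intro node parentNode _
  unfold Spec_isBoxMoved
  exact pv_side node parentNode
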